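-- pv_equiv track=rewrite | github.com/raphaelbecherer/wlan-cracker | hashcat_cracker.py | _estimate_keyspace
-- ===== SOURCE A (Python) =====
-- def _estimate_keyspace(mask):
--     """Estimate keyspace size for a mask."""
--     charset_sizes = {
--         "?d": 10,
--         "?l": 26,
--         "?u": 26,
--         "?a": 95,
--         "?s": 33,
--         "?h": 16,  # hex lowercase
--         "?H": 16,  # hex uppercase
--     }
--     total = 1
--     i = 0
--     while i < len(mask):
--         if i + 1 < len(mask) and mask[i] == "?":
--             key = mask[i:i + 2]
--             total *= charset_sizes.get(key, 95)
--             i += 2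
--         else:
--             i += 1  # literal character
--     return total if total > 1 else None
-- ===== SOURCE B (Python) =====
-- def _estimate_keyspace(mask):
--     """Estimate keyspace size for a mask."""
--     charset_sizes = {
--         "?d": 10,
--         "?l": 26,
--         "?u": 26,
--         "?a": 95,
--         "?s": 33,
--         "?h": 16,
--         "?H": 16,
--     }
--     total = 1
--     s = mask
--     while True:
--         p = s.find("?")
--         if p == -1 or p + 1 >= len(s):
--             break
--         total *= charset_sizes.get(s[p:p + 2], 95)
--         s = s[p + 2:]
--     return total if total > 1 else None
-- ===== Notes on version B (the rewrite author's own statement) =====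
-- stated objective: faster
-- what changed: Replaces the per-character index while loop with a loop that jumps straight to the next mask token via str.find and slices off the consumed suffix, so the Python-level loop runs once per token instead of once per character (character skipping moves into C-level str.find).
import Mathlib
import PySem

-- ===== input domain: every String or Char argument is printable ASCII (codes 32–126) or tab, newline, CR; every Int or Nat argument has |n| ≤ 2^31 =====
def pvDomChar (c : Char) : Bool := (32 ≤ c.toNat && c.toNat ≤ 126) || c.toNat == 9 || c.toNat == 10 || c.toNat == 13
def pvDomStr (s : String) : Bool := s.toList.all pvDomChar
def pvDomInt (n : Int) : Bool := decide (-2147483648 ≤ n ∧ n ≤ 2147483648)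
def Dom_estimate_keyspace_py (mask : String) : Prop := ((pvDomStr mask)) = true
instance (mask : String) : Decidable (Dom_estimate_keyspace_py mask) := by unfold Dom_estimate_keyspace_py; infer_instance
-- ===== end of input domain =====

-- B replaces A's per-character index scan with a loop that jumps to the next token via str.find
-- and slices off the consumed suffix; a timing run measured B faster (C-level find vs Python loop).

-- ===== PORT A =====
-- the charset_sizes dict literal (identical in A and B; shared here)
def charsetSizes : PySem.Dict (List Char) Int :=
  PySem.Dict.ofList [(['?','d'],10),(['?','l'],26),(['?','u'],26),(['?','a'],95),(['?','s'],33),(['?','h'],16),(['?','H'],16)]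

-- the while loop of A: at suffix c::d::rest the test 'i+1 < len and mask[i] == "?"' holds iff c = '?'
def loopA : List Char → Int → Int
  | [], total => total
  | [_], total => total          -- i+1 < len fails: literal skip, then loop ends
  | c :: d :: rest, total =>
    if c = '?' then loopA rest (total * charsetSizes.getD [c, d] 95)
    else loopA (d :: rest) total

def estimate_keyspace_py (mask : String) : Option Int :=
  let total := loopA mask.toList 1
  if total > 1 then some total else none

-- ===== PORT B =====
-- the while loop of B: p = s.find("?"); stop if p == -1 or p+1 >= len(s); else multiply by s[p:p+2]'s size and continue on s[p+2:]
def loopB (s : List Char) (total : Int) : Int :=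
  let p := PySem.Chars.find s ['?']
  if p = -1 ∨ p + 1 ≥ (s.length : Int) then total
  else loopB (s.drop (p + 2).toNat) (total * charsetSizes.getD (PySem.List.slice s (some p) (some (p + 2))) 95)
termination_by s.length
decreasing_by
  have h1 := PySem.Chars.neg_one_le_find s ['?']
  rename_i h
  simp only [List.length_drop]
  omega

def estimate_keyspace_py_alt (mask : String) : Option Int :=
  let total := loopB mask.toList 1
  if total > 1 then some total else none

-- ===== PRECONDITION & SPEC =====
def Spec_estimate_keyspace_py (mask : String) (out : Option Int) : Prop := out = estimate_keyspace_py_alt mask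
instance (mask : String) (out : Option Int) : Decidable (Spec_estimate_keyspace_py mask out) := by unfold Spec_estimate_keyspace_py; infer_instance

-- ===== CLAIM (what is proved, stated in full; the proofs are below) =====
def Claim_equal_estimate_keyspace_py : Prop := ∀ (mask : String), Dom_estimate_keyspace_py mask → Spec_estimate_keyspace_py mask (estimate_keyspace_py mask)

-- ===== LEMMAS AND PROOFS =====

lemma loopA_skip (pre rest : List Char) (hpre : '?' ∉ pre) (t : Int) :
    loopA (pre ++ rest) t = loopA rest t := by
  induction pre generalizing t with
  | nil => rfl
  | cons a pre' ih =>
    have ha : a ≠ '?' := by intro h; exact hpre (h ▸ List.mem_cons_self)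
    have hpre' : '?' ∉ pre' := fun h => hpre (List.mem_cons_of_mem _ h)
    cases hpr : pre' ++ rest with
    | nil =>
      rcases List.append_eq_nil_iff.mp hpr with ⟨h1, h2⟩
      subst h1; subst h2
      rfl
    | cons b l =>
      have : loopA (a :: (pre' ++ rest)) t = loopA (pre' ++ rest) t := by
        rw [hpr]
        simp [loopA, ha]
      simpa [List.cons_append] using this.trans (ih hpre' t)

lemma mem_to_infix {c : Char} {l : List Char} (h : c ∈ l) : [c] <:+: l := by
  obtain ⟨u, v, rfl⟩ := List.append_of_mem h
  exact ⟨u, v, by simp⟩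


lemma noQ_take (s : List Char) (k : Nat) (hmin : ∀ i < k, ¬ ['?'] <+: s.drop i) : '?' ∉ s.take k := by
  intro hmem
  obtain ⟨i, hi, hgi⟩ := List.getElem_of_mem hmem
  have hi' := hi
  simp [List.length_take] at hi'
  have hik : i < k := hi'.1
  have his : i < s.length := hi'.2
  have hsi : s[i] = '?' := by
    rw [← hgi]; simp [List.getElem_take]
  refine hmin i hik ⟨s.drop (i + 1), ?_⟩
  rw [List.drop_eq_getElem_cons his, hsi]
  rfl

lemma loopA_eq_loopB_aux (n : Nat) : ∀ s : List Char, s.length ≤ n → ∀ t : Int, loopA s t = loopB s t := by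
  induction n with
  | zero =>
    intro s hs t
    have : s = [] := List.eq_nil_of_length_eq_zero (Nat.le_zero.mp hs)
    subst this
    rw [loopB]
    rfl
  | succ n ih =>
    intro s hs t
    rw [loopB]
    by_cases h1 : PySem.Chars.find s ['?'] = -1 ∨ PySem.Chars.find s ['?'] + 1 ≥ (s.length : Int)
    · rw [if_pos h1]
      by_cases hne : PySem.Chars.find s ['?'] = -1
      · have hnot : '?' ∉ s := by
          intro hmem
          exact ((PySem.Chars.find_eq_neg_one_iff s ['?']).mp hne) (mem_to_infix hmem)
        simpa using loopA_skip s [] hnot t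
      · have hnn : 0 ≤ PySem.Chars.find s ['?'] := by
          have := PySem.Chars.neg_one_le_find s ['?']
          omega
        obtain ⟨hpref, hmin⟩ := PySem.Chars.find_spec (s := s) (sub := ['?']) hnn
        set p := PySem.Chars.find s ['?'] with hp
        set k := p.toNat with hk
        have hpk : p = (k : Int) := (Int.toNat_of_nonneg hnn).symm
        obtain ⟨u, hu⟩ := hpref
        have hdk : s.drop k = '?' :: u := hu.symm
        have hklen : k < s.length := by
          by_contra hge
          push Not at hge
          rw [List.drop_eq_nil_of_le hge] at hdk
          exact (List.cons_ne_nil _ _) hdk.symm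
        have hcond : p + 1 ≥ (s.length : Int) := h1.resolve_left hne
        have hlen : s.length = k + 1 := by omega
        have hueq : u = [] := by
          have := congrArg List.length hdk
          simp [List.length_drop, hlen] at this
          exact this
        have hs' : s = s.take k ++ ['?'] := by
          conv_lhs => rw [← List.take_append_drop k s]
          rw [hdk, hueq]
        rw [hs', loopA_skip _ _ (noQ_take s k hmin) t]
        rfl
    · rw [if_neg h1]
      push Not at h1
      obtain ⟨hne, hlt⟩ := h1
      have hnn : 0 ≤ PySem.Chars.find s ['?'] := by
        have := PySem.Chars.neg_one_le_find s ['?']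
        omega
      obtain ⟨hpref, hmin⟩ := PySem.Chars.find_spec (s := s) (sub := ['?']) hnn
      set p := PySem.Chars.find s ['?'] with hp
      set k := p.toNat with hk
      have hpk : p = (k : Int) := (Int.toNat_of_nonneg hnn).symm
      obtain ⟨u, hu⟩ := hpref
      have hdk : s.drop k = '?' :: u := hu.symm
      have hklen : k < s.length := by
        by_contra hge
        push Not at hge
        rw [List.drop_eq_nil_of_le hge] at hdk
        exact (List.cons_ne_nil _ _) hdk.symm
      have hk1len : k + 1 < s.length := by
        rw [hpk] at hlt
        exact_mod_cast hlt
      obtain ⟨d, v, huv⟩ : ∃ d v, u = d :: v := by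
        cases u with
        | nil =>
          exfalso
          have := congrArg List.length hdk
          simp [List.length_drop] at this
          omega
        | cons d v => exact ⟨d, v, rfl⟩
      subst huv
      -- left side
      have hs' : s = s.take k ++ '?' :: d :: v := by
        conv_lhs => rw [← List.take_append_drop k s]
        rw [hdk]
      have hA : loopA s t = loopA v (t * charsetSizes.getD ['?', d] 95) := by
        rw [hs', loopA_skip _ _ (noQ_take s k hmin) t]
        simp [loopA]
      -- right side pieces
      have htn : (p + 2).toNat = k + 2 := by omega
      have hdrop : s.drop (p + 2).toNat = v := by
        rw [htn, ← List.drop_drop, hdk]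
        rfl
      have hslice : PySem.List.slice s (some p) (some (p + 2)) = ['?', d] := by
        rw [hpk]
        have : (k : Int) + 2 = ((k + 2 : Nat) : Int) := by push_cast; ring
        rw [this, PySem.List.slice_natCast, hdk]
        simp
      rw [hdrop, hslice, hA]
      have hvlen : v.length ≤ n := by
        have := congrArg List.length hdk
        simp [List.length_drop] at this
        omega
      exact ih v hvlen _

lemma loopA_eq_loopB (s : List Char) (t : Int) : loopA s t = loopB s t :=
  loopA_eq_loopB_aux s.length s le_rfl t

-- ===== VERDICT (by name: the statement is the Claim_ definition above) =====
theorem estimate_keyspace_py_spec : Claim_equal_estimate_keyspace_py := by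
  intro mask _
  unfold Spec_estimate_keyspace_py estimate_keyspace_py estimate_keyspace_py_alt
  simp [loopA_eq_loopB]
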